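-- pv_equiv track=rewrite | github.com/yly-revive/chainer-mreader | src_def/find.py | cal_oov_dict
-- ===== SOURCE A (Python) =====
-- def cal_oov_dict(vocab, dict_vocab, text):
--     tokens = text.strip().split("', '")
--     vocab_count = 0
--     dict_vocab_count = 0
--     dict_vocab_count_2 = 0
--     for token in tokens:
--         if token.lower() not in vocab:
--             vocab_count += 1
--             if token.lower() not in dict_vocab:
--                 dict_vocab_count += 1
--         # if token not in dict_vocab:
--         #    dict_vocab_count+=1
--         if token.lower() not in dict_vocab:
--             dict_vocab_count_2 += 1
--
--     return len(tokens), vocab_count, dict_vocab_count, dict_vocab_count_2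
-- ===== SOURCE B (Python) =====
-- def cal_oov_dict(vocab, dict_vocab, text):
--     tokens = text.strip().split("', '")
--     counts = {}
--     for t in tokens:
--         counts[t] = counts.get(t, 0) + 1
--     vset = set(vocab)
--     dset = set(dict_vocab)
--     vocab_count = 0
--     dict_vocab_count = 0
--     dict_vocab_count_2 = 0
--     for tok, n in counts.items():
--         low = tok.lower()
--         in_v = low in vset
--         in_d = low in dset
--         vocab_count += n if not in_v else 0
--         dict_vocab_count += n if (not in_v and not in_d) else 0
--         dict_vocab_count_2 += n if not in_d else 0
--     return len(tokens), vocab_count, dict_vocab_count, dict_vocab_count_2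
-- ===== Notes on version B (the rewrite author's own statement) =====
-- stated objective: alternative
-- what changed: B tabulates token frequencies into a dict (Counter-style) and converts both vocabularies to sets, then makes one weighted pass over the distinct tokens adding each token's count to the three accumulators, instead of A's per-token membership scans over the raw vocabulary lists.
import Mathlib
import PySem

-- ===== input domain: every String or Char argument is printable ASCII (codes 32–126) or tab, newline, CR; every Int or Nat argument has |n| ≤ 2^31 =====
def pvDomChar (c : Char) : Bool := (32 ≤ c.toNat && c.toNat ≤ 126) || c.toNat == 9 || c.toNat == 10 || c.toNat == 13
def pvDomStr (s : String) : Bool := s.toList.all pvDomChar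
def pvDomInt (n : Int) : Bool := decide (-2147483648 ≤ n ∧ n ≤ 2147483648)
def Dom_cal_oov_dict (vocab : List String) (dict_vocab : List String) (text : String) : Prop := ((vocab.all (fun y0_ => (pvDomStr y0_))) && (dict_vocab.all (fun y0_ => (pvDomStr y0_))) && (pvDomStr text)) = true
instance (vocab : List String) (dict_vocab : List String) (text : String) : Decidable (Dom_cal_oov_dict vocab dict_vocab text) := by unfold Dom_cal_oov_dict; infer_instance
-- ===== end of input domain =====

-- B replaces A's per-token membership loop by a frequency table (Counter) over the tokens,
-- then one weighted pass over the DISTINCT tokens, with the vocabularies turned into sets.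


-- ===== PORT A =====
-- tokens = text.strip().split("', '"); the separator is a nonempty literal, so split? is always `some`
def cal_oov_dict (vocab : List String) (dict_vocab : List String) (text : String) : Int × Int × Int × Int :=
  let tokens := (PySem.Str.split? (PySem.Str.strip text) "', '").getD []
  let res : Int × Int × Int :=
    tokens.foldl (fun acc token =>
      let acc :=
        if !(vocab.contains (PySem.Str.lower token)) then
          (acc.1 + 1,
           acc.2.1 + (if !(dict_vocab.contains (PySem.Str.lower token)) then 1 else 0),
           acc.2.2)
        else acc
      if !(dict_vocab.contains (PySem.Str.lower token)) then
        (acc.1, acc.2.1, acc.2.2 + 1)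
      else acc) (0, 0, 0)
  ((tokens.length : Int), res.1, res.2.1, res.2.2)

-- ===== PORT B =====
def cal_oov_dict_alt (vocab : List String) (dict_vocab : List String) (text : String) : Int × Int × Int × Int :=
  let tokens := (PySem.Str.split? (PySem.Str.strip text) "', '").getD []
  let counts := tokens.foldl (fun d t => d.insert t (d.getD t 0 + 1)) PySem.Dict.empty
  let vset := PySem.Set.ofList vocab
  let dset := PySem.Set.ofList dict_vocab
  let res : Int × Int × Int :=
    counts.items.foldl (fun acc p =>
      let low := PySem.Str.lower p.1
      let in_v := PySem.Set.contains vset low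
      let in_d := PySem.Set.contains dset low
      (acc.1 + (if !in_v then p.2 else 0),
       acc.2.1 + (if !in_v && !in_d then p.2 else 0),
       acc.2.2 + (if !in_d then p.2 else 0))) (0, 0, 0)
  ((tokens.length : Int), res.1, res.2.1, res.2.2)

-- ===== PRECONDITION & SPEC =====
def Spec_cal_oov_dict (vocab : List String) (dict_vocab : List String) (text : String) (out : Int × Int × Int × Int) : Prop := out = cal_oov_dict_alt vocab dict_vocab text
instance (vocab : List String) (dict_vocab : List String) (text : String) (out : Int × Int × Int × Int) : Decidable (Spec_cal_oov_dict vocab dict_vocab text out) := by unfold Spec_cal_oov_dict; infer_instance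

-- ===== CLAIM (what is proved, stated in full; the proofs are below) =====
def Claim_equal_cal_oov_dict : Prop := ∀ (vocab : List String) (dict_vocab : List String) (text : String), Dom_cal_oov_dict vocab dict_vocab text → Spec_cal_oov_dict vocab dict_vocab text (cal_oov_dict vocab dict_vocab text)

-- ===== LEMMAS AND PROOFS =====

-- per-token contribution (vc, dc, dc2) to A's three accumulators
def pvG (vocab dict_vocab : List String) (t : String) : Int × Int × Int :=
  ((if !(vocab.contains (PySem.Str.lower t)) then 1 else 0),
   (if !(vocab.contains (PySem.Str.lower t)) && !(dict_vocab.contains (PySem.Str.lower t)) then 1 else 0),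
   (if !(dict_vocab.contains (PySem.Str.lower t)) then 1 else 0))

-- a fold that adds f x each step is init + sum of the mapped list
theorem pv_foldl_add {α M : Type} [AddCommMonoid M] (f : α → M) :
    ∀ (l : List α) (init : M), l.foldl (fun acc x => acc + f x) init = init + (l.map f).sum := by
  intro l
  induction l with
  | nil => intro init; simp
  | cons x l ih => intro init; simp [List.foldl_cons, ih, add_assoc]

theorem pv_sum_single {α M : Type} [DecidableEq α] [AddCommMonoid M] (g : α → M) (x : α) :
    ∀ (s : List α), s.Nodup → x ∈ s →
      (s.map (fun k => if k = x then g k else 0)).sum = g x := by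
  intro s
  induction s with
  | nil => intro _ h; cases h
  | cons y s ih =>
    intro hnd hx
    rcases List.mem_cons.mp hx with h | h
    · subst h
      have : ∀ k ∈ s, (if k = x then g k else 0) = 0 := by
        intro k hk
        have : k ≠ x := by
          intro h'; subst h'; exact (List.nodup_cons.mp hnd).1 hk
        simp [this]
      simp [List.map_cons, List.sum_cons, List.sum_eq_zero (by
        intro z hz
        rcases List.mem_map.mp hz with ⟨k, hk, rfl⟩
        exact this k hk)]
    · have hyx : y ≠ x := by
        intro h'; subst h'; exact (List.nodup_cons.mp hnd).1 h
      simp [List.map_cons, List.sum_cons, hyx, ih (List.nodup_cons.mp hnd).2 h]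

-- summing count-weighted contributions over any nodup cover of l equals summing over l
theorem pv_sum_count {α M : Type} [DecidableEq α] [BEq α] [LawfulBEq α] [AddCommMonoid M]
    (g : α → M) (s : List α) (hs : s.Nodup) :
    ∀ (l : List α), (∀ y ∈ l, y ∈ s) →
      (s.map (fun k => (l.count k) • g k)).sum = (l.map g).sum := by
  intro l
  induction l with
  | nil => intro _; simp
  | cons x l ih =>
    intro hcov
    have hx : x ∈ s := hcov x (List.mem_cons_self ..)
    have hcov' : ∀ y ∈ l, y ∈ s := fun y hy => hcov y (List.mem_cons_of_mem _ hy)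
    have hsplit : ∀ k : α, ((x :: l).count k) • g k
        = (l.count k) • g k + (if k = x then g k else 0) := by
      intro k
      by_cases h : k = x
      · subst h
        simp [succ_nsmul]
      · have : (x == k) = false := by
          simp [beq_eq_false_iff_ne]; exact fun h' => h h'.symm
        simp [List.count_cons, this, h]
    calc (s.map (fun k => ((x :: l).count k) • g k)).sum
        = (s.map (fun k => (l.count k) • g k + (if k = x then g k else 0))).sum := by
          congr 1; exact List.map_congr_left (fun k _ => hsplit k)
      _ = (s.map (fun k => (l.count k) • g k)).sum
          + (s.map (fun k => if k = x then g k else 0)).sum := List.sum_map_add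
      _ = (l.map g).sum + g x := by rw [ih hcov', pv_sum_single g x s hs hx]
      _ = ((x :: l).map g).sum := by simp [List.map_cons, List.sum_cons, add_comm]

-- A's loop body is acc + pvG token
theorem pv_bodyA (vocab dict_vocab : List String) :
    (fun (acc : Int × Int × Int) token =>
      let acc :=
        if !(vocab.contains (PySem.Str.lower token)) then
          (acc.1 + 1,
           acc.2.1 + (if !(dict_vocab.contains (PySem.Str.lower token)) then 1 else 0),
           acc.2.2)
        else acc
      if !(dict_vocab.contains (PySem.Str.lower token)) then
        (acc.1, acc.2.1, acc.2.2 + 1)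
      else acc)
    = fun acc token => acc + pvG vocab dict_vocab token := by
  funext acc token
  simp only [pvG]
  cases hv : vocab.contains (PySem.Str.lower token) <;>
    cases hd : dict_vocab.contains (PySem.Str.lower token) <;>
      simp [Prod.ext_iff]
-- B's loop body is acc + count • pvG token (on counter items, p.2 = count as an Int)
theorem pv_bodyB (vocab dict_vocab : List String) :
    (fun (acc : Int × Int × Int) (p : String × Int) =>
      let low := PySem.Str.lower p.1
      let in_v := PySem.Set.contains (PySem.Set.ofList vocab) low
      let in_d := PySem.Set.contains (PySem.Set.ofList dict_vocab) low
      (acc.1 + (if !in_v then p.2 else 0),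
       acc.2.1 + (if !in_v && !in_d then p.2 else 0),
       acc.2.2 + (if !in_d then p.2 else 0)))
    = fun acc p => acc + (p.2 * (pvG vocab dict_vocab p.1).1,
                          p.2 * (pvG vocab dict_vocab p.1).2.1,
                          p.2 * (pvG vocab dict_vocab p.1).2.2) := by
  funext acc p
  have hv : PySem.Set.contains (PySem.Set.ofList vocab) (PySem.Str.lower p.1)
      = vocab.contains (PySem.Str.lower p.1) := by
    simp [PySem.Set.contains, List.contains_eq_mem, PySem.Set.mem_ofList]
  have hd : PySem.Set.contains (PySem.Set.ofList dict_vocab) (PySem.Str.lower p.1)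
      = dict_vocab.contains (PySem.Str.lower p.1) := by
    simp [PySem.Set.contains, List.contains_eq_mem, PySem.Set.mem_ofList]
  simp only [pvG, hv, hd, Prod.ext_iff]
  cases vocab.contains (PySem.Str.lower p.1) <;>
    cases dict_vocab.contains (PySem.Str.lower p.1) <;>
      simp

theorem pv_nat_mul_eq_smul (n : ℕ) (v : Int × Int × Int) :
    ((n : Int) * v.1, (n : Int) * v.2.1, (n : Int) * v.2.2) = n • v := by
  cases v with
  | mk a bc =>
    cases bc with
    | mk b c => simp [Prod.smul_def]


-- the two accumulator folds agree
theorem pv_main (vocab dict_vocab : List String) (tokens : List String) :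
    tokens.foldl (fun (acc : Int × Int × Int) token =>
      let acc :=
        if !(vocab.contains (PySem.Str.lower token)) then
          (acc.1 + 1,
           acc.2.1 + (if !(dict_vocab.contains (PySem.Str.lower token)) then 1 else 0),
           acc.2.2)
        else acc
      if !(dict_vocab.contains (PySem.Str.lower token)) then
        (acc.1, acc.2.1, acc.2.2 + 1)
      else acc) (0, 0, 0)
    = (tokens.foldl (fun d t => d.insert t (d.getD t 0 + 1)) PySem.Dict.empty).items.foldl
        (fun (acc : Int × Int × Int) (p : String × Int) =>
          let low := PySem.Str.lower p.1
          let in_v := PySem.Set.contains (PySem.Set.ofList vocab) low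
          let in_d := PySem.Set.contains (PySem.Set.ofList dict_vocab) low
          (acc.1 + (if !in_v then p.2 else 0),
           acc.2.1 + (if !in_v && !in_d then p.2 else 0),
           acc.2.2 + (if !in_d then p.2 else 0))) (0, 0, 0) := by
  rw [pv_bodyA, pv_bodyB, PySem.Dict.foldl_insert_getD_add_one_eq_counter,
      PySem.Dict.items_counter, pv_foldl_add, pv_foldl_add, List.map_map]
  have h2 : ((PySem.Set.ofList tokens).map
        ((fun (p : String × Int) => (p.2 * (pvG vocab dict_vocab p.1).1,
            p.2 * (pvG vocab dict_vocab p.1).2.1,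
            p.2 * (pvG vocab dict_vocab p.1).2.2))
          ∘ fun k => (k, ((tokens.count k : ℕ) : Int)))).sum
      = ((PySem.Set.ofList tokens).map (fun k => (tokens.count k) • pvG vocab dict_vocab k)).sum :=
    congrArg List.sum (List.map_congr_left (fun k _ => by
      simpa using pv_nat_mul_eq_smul (tokens.count k) (pvG vocab dict_vocab k)))
  rw [h2, pv_sum_count (pvG vocab dict_vocab) (PySem.Set.ofList tokens)
      (PySem.Set.nodup_ofList tokens) tokens
      (fun y hy => (PySem.Set.mem_ofList tokens y).mpr hy)]

-- ===== VERDICT (by name: the statement is the Claim_ definition above) =====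
theorem cal_oov_dict_spec : Claim_equal_cal_oov_dict := by
  intro vocab dict_vocab text _
  simp only [Spec_cal_oov_dict, cal_oov_dict, cal_oov_dict_alt]
  rw [pv_main]
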